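-- pv_equiv track=rewrite | github.com/LuluLizzy8/NLP | Noun Group Tagger/extract_features.py | tags_since_dt
-- ===== SOURCE A (Python) =====
-- def tags_since_dt(sentence, i):
--     tags = set()
--     for word_pos in sentence[:i]:
--         _, pos = word_pos.split()
--         if pos == 'DT':
--             tags = set()
--         else:
--             tags.add(pos)
--     return '+'.join(sorted(tags))
-- ===== SOURCE B (Python) =====
-- def tags_since_dt(sentence, i):
--     poses = []
--     for word_pos in sentence[:i]:
--         _, pos = word_pos.split()
--         poses.append(pos)
--     tail = []
--     for p in reversed(poses):
--         if p == 'DT':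
--             break
--         tail.append(p)
--     return '+'.join(sorted(set(tail)))
-- ===== Notes on version B (the rewrite author's own statement) =====
-- stated objective: alternative
-- what changed: Replaces the forward reset-on-DT accumulator set with a two-phase decomposition: first extract all POS tags of the prefix, then collect the tags after the last 'DT' by scanning the tag list backwards until a 'DT' is hit.
import Mathlib
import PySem

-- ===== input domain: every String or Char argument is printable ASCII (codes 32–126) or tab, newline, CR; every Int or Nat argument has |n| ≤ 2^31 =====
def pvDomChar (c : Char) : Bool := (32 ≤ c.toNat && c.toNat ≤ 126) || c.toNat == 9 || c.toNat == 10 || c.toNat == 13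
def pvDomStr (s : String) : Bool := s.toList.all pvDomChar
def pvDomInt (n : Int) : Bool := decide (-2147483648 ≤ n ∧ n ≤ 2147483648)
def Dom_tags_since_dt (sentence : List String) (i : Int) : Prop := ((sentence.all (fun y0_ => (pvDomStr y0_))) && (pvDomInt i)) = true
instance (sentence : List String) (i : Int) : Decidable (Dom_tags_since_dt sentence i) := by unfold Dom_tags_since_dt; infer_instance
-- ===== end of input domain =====

-- B replaces A's forward reset-on-DT accumulator with a two-phase decomposition
-- (extract all tags, then scan backwards until a 'DT'); objective: alternative.

-- shared helper: '_, pos = word_pos.split()' — the second whitespace token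
-- (exact whenever the split has exactly two parts, which Pre_ guarantees; Python raises ValueError otherwise)
def pvPosOf (w : String) : String := (PySem.Str.split₀ w).getD 1 ""

-- ===== PORT A =====
def tags_since_dt (sentence : List String) (i : Int) : String :=
  let tags : PySem.Set String :=
    (PySem.List.slice sentence none (some i)).foldl
      (fun tags w =>
        let pos := pvPosOf w
        if pos = "DT" then PySem.Set.empty else PySem.Set.add tags pos)
      PySem.Set.empty
  PySem.Str.join "+" (PySem.List.sorted tags (fun x => x) false)

-- ===== PORT B =====
-- the 'for p in reversed(poses): if p == 'DT': break; tail.append(p)' loop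
def pvCollectTail : List String → List String
  | [] => []
  | p :: rest => if p = "DT" then [] else p :: pvCollectTail rest

def tags_since_dt_alt (sentence : List String) (i : Int) : String :=
  let poses := (PySem.List.slice sentence none (some i)).map pvPosOf
  let tail := pvCollectTail poses.reverse
  PySem.Str.join "+" (PySem.List.sorted (PySem.Set.ofList tail) (fun x => x) false)

-- ===== PRECONDITION & SPEC =====
-- Pre_ excludes exactly the inputs where A raises ValueError: some word in sentence[:i]
-- does not split into exactly two whitespace-separated tokens.
def Pre_tags_since_dt (sentence : List String) (i : Int) : Prop :=
  ∀ w ∈ PySem.List.slice sentence none (some i), (PySem.Str.split₀ w).length = 2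
instance (sentence : List String) (i : Int) : Decidable (Pre_tags_since_dt sentence i) := by
  unfold Pre_tags_since_dt; infer_instance
def pvWitness_tags_since_dt : List String × Int := (["the DT", "dog NN", "big JJ"], 3)

def Spec_tags_since_dt (sentence : List String) (i : Int) (out : String) : Prop := out = tags_since_dt_alt sentence i
instance (sentence : List String) (i : Int) (out : String) : Decidable (Spec_tags_since_dt sentence i out) := by unfold Spec_tags_since_dt; infer_instance

-- ===== CLAIM (what is proved, stated in full; the proofs are below) =====
def Claim_equal_tags_since_dt : Prop := ∀ (sentence : List String) (i : Int), Dom_tags_since_dt sentence i → Pre_tags_since_dt sentence i → Spec_tags_since_dt sentence i (tags_since_dt sentence i)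

-- ===== LEMMAS AND PROOFS =====

def pvStepA (s : PySem.Set String) (p : String) : PySem.Set String :=
  if p = "DT" then PySem.Set.empty else PySem.Set.add s p

lemma pvCollectTail_append (a b : List String) :
    pvCollectTail (a ++ b) = if "DT" ∈ a then pvCollectTail a else a ++ pvCollectTail b := by
  induction a with
  | nil => simp
  | cons p rest ih =>
    by_cases hp : p = "DT" <;> simp [pvCollectTail, hp, ih] <;> (split_ifs <;> simp_all)

lemma pvCollectTail_of_not_mem (a : List String) (h : "DT" ∉ a) : pvCollectTail a = a := by
  induction a with
  | nil => rfl
  | cons p rest ih =>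
    simp only [List.mem_cons, not_or] at h
    have hp : p ≠ "DT" := fun hh => h.1 hh.symm
    simp [pvCollectTail, hp, ih h.2]

lemma pvFoldA_nodup (l : List String) (s : PySem.Set String) (hs : s.Nodup) :
    (l.foldl pvStepA s).Nodup := by
  induction l generalizing s with
  | nil => exact hs
  | cons p rest ih =>
    simp only [List.foldl_cons]
    unfold pvStepA
    split_ifs
    · exact ih _ List.nodup_nil
    · exact ih _ (PySem.Set.nodup_add _ _ hs)

lemma pvFoldA_mem (l : List String) (s : PySem.Set String) (x : String) :
    x ∈ l.foldl pvStepA s ↔ x ∈ pvCollectTail l.reverse ∨ ("DT" ∉ l ∧ x ∈ s) := by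
  induction l generalizing s with
  | nil => simp [pvCollectTail]
  | cons p rest ih =>
    rw [List.foldl_cons, List.reverse_cons, pvCollectTail_append]
    by_cases hp : p = "DT"
    · subst hp
      rw [show pvStepA s "DT" = PySem.Set.empty from if_pos rfl, ih]
      by_cases hDT : "DT" ∈ rest
      · have hr : "DT" ∈ rest.reverse := by simpa using hDT
        simp [hDT, hr, PySem.Set.empty]
      · have hnr : "DT" ∉ rest.reverse := by simpa using hDT
        simp [hDT, hnr, pvCollectTail_of_not_mem _ hnr, pvCollectTail, PySem.Set.empty,
          List.mem_reverse]
    · rw [show pvStepA s p = PySem.Set.add s p from if_neg hp, ih]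
      by_cases hDT : "DT" ∈ rest
      · have hr : "DT" ∈ rest.reverse := by simpa using hDT
        simp [hDT, hr]
      · have hnr : "DT" ∉ rest.reverse := by simpa using hDT
        simp [hDT, hnr, pvCollectTail_of_not_mem _ hnr, pvCollectTail, hp,
          PySem.Set.mem_add, List.mem_reverse]
        tauto

-- ===== VERDICT (by name: the statement is the Claim_ definition above) =====
theorem tags_since_dt_spec : Claim_equal_tags_since_dt := by
  intro sentence i _ _
  unfold Spec_tags_since_dt tags_since_dt tags_since_dt_alt
  simp only
  set pref := PySem.List.slice sentence none (some i) with hpref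
  have hfold : pref.foldl
      (fun tags w => if pvPosOf w = "DT" then PySem.Set.empty else PySem.Set.add tags (pvPosOf w))
      PySem.Set.empty = (pref.map pvPosOf).foldl pvStepA PySem.Set.empty := by
    rw [List.foldl_map]; rfl
  rw [hfold]
  congr 1
  apply PySem.List.sorted_eq_sorted_of_perm _ _ _ (fun _ _ h => h)
  refine (List.perm_ext_iff_of_nodup (pvFoldA_nodup _ _ List.nodup_nil)
    (PySem.Set.nodup_ofList _)).mpr ?_
  intro x
  rw [pvFoldA_mem, PySem.Set.mem_ofList]
  simp
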